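-- pv_equiv track=rewrite | github.com/aaronwppe/bp-pre-internship | python/20.py | is_woodall
-- ===== SOURCE A (Python) =====
-- def is_woodall(num: int) -> bool:
--     if num % 2 == 0:
--         return False
--
--     num += 1
--     power = 0
--
--     while num % 2 == 0:
--         num //= 2
--         power += 1
--
--         if power == num:
--             return True
--
--     return False
-- ===== SOURCE B (Python) =====
-- def is_woodall(num: int) -> bool:
--     k = 1
--     while True:
--         w = k * (1 << k) - 1
--         if w == num:
--             return True
--         if w > num:
--             return False
--         k += 1
-- ===== Notes on version B (the rewrite author's own statement) =====
-- stated objective: alternative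
-- what changed: B enumerates Woodall candidates k*2^k-1 upward and compares them to num, instead of A's stripping powers of 2 from num+1 and matching the step count.
-- outside the precondition, e.g. on is_woodall(-1): A does not finish within the time limit, B returns False
import Mathlib
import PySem

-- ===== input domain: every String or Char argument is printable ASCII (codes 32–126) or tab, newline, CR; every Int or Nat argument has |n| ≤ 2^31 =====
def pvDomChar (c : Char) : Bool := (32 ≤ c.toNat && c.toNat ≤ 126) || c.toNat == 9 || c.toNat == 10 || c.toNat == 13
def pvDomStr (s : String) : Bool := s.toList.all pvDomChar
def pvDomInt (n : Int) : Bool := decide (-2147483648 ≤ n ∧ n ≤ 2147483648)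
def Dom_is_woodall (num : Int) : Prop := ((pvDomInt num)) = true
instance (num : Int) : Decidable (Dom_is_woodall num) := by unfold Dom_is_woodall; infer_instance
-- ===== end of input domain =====

-- B enumerates Woodall candidates k*2^k-1 upward instead of A's stripping powers of 2 from num+1;
-- same asymptotic cost, a genuinely different strategy (objective: alternative).

-- ===== PORT A =====
-- A's while-loop; fuel = |n| bounds the halvings (the loop terminates within it for every n ≠ 0,
-- which Pre_ guarantees; fuel only makes the recursion total).
def pvLoopA : Int → Int → Nat → Bool
  | _, _, 0 => false
  | n, p, fuel+1 =>
    if PySem.Int.mod n 2 = 0 then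
      let n' := PySem.Int.floordiv n 2
      if p + 1 = n' then true else pvLoopA n' (p + 1) fuel
    else false

def is_woodall (num : Int) : Bool :=
  if PySem.Int.mod num 2 = 0 then false
  else pvLoopA (num + 1) 0 (num + 1).natAbs

-- ===== PORT B =====
-- B's 'while True' loop; fuel = |num|+1 bounds the candidates tried (w exceeds num within it).
def pvLoopB (num : Int) : Nat → Nat → Bool
  | _, 0 => false
  | k, fuel+1 =>
    let w : Int := (k : Int) * 2 ^ k - 1
    if w = num then true
    else if w > num then false
    else pvLoopB num (k + 1) fuel

def is_woodall_alt (num : Int) : Bool := pvLoopB num 1 (num.natAbs + 1)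

-- ===== PRECONDITION & SPEC =====
-- Pre_ excludes only num = -1, on which A's while-loop never terminates (num+1 = 0 stays 0 forever).
def Pre_is_woodall (num : Int) : Prop := num ≠ -1
instance (num : Int) : Decidable (Pre_is_woodall num) := by unfold Pre_is_woodall; infer_instance
def pvWitness_is_woodall : Int := (7)

def Spec_is_woodall (num : Int) (out : Bool) : Prop := out = is_woodall_alt num
instance (num : Int) (out : Bool) : Decidable (Spec_is_woodall num out) := by unfold Spec_is_woodall; infer_instance

-- ===== CLAIM (what is proved, stated in full; the proofs are below) =====
def Claim_equal_is_woodall : Prop := ∀ (num : Int), Dom_is_woodall num → Pre_is_woodall num → Spec_is_woodall num (is_woodall num)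

-- ===== LEMMAS AND PROOFS =====

-- A's loop returns true iff n = (p+i)·2^i for some i ≥ 1 (p = power so far, n = current value).
theorem pvLoopA_iff (fuel : Nat) : ∀ (n p : Int), n ≠ 0 → n.natAbs ≤ fuel →
    (pvLoopA n p fuel = true ↔ ∃ i : Nat, 1 ≤ i ∧ n = (p + i) * 2 ^ i) := by
  induction fuel with
  | zero => intro n p hn hle; omega
  | succ f ih =>
    intro n p hn hle
    rw [pvLoopA]
    rw [PySem.Int.mod_eq_emod_of_pos (by norm_num), PySem.Int.floordiv_eq_ediv_of_pos (by norm_num)]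
    by_cases hev : (2 : Int) ∣ n
    · obtain ⟨m, hm⟩ := hev
      have hne : n % 2 = 0 := by omega
      have hdiv : n / 2 = m := by omega
      rw [if_pos hne]
      simp only [hdiv]
      by_cases heq : p + 1 = m
      · rw [if_pos heq]
        exact iff_of_true rfl ⟨1, le_refl 1, by push_cast; omega⟩
      · rw [if_neg heq]
        rw [ih m (p + 1) (by omega) (by omega)]
        constructor
        · rintro ⟨i, hi1, hmi⟩
          refine ⟨i + 1, by omega, ?_⟩
          push_cast
          rw [hm, hmi]
          ring
        · rintro ⟨i, hi1, hni⟩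
          have hi2 : 2 ≤ i := by
            rcases Nat.lt_or_ge i 2 with h | h
            · exfalso
              have : i = 1 := by omega
              subst this
              apply heq
              simp at hni
              omega
            · exact h
          refine ⟨i - 1, by omega, ?_⟩
          have h2 : (2 : Int) ^ i = 2 ^ (i - 1) * 2 := by
            rw [← pow_succ]; congr 1; omega
          rw [h2] at hni
          have h4 : (2 : Int) * m = 2 * ((p + ↑i) * 2 ^ (i - 1)) := by rw [← hm, hni]; ring
          have h5 := mul_left_cancel₀ (by norm_num : (2 : Int) ≠ 0) h4
          have hc : ((i - 1 : Nat) : Int) = (i : Int) - 1 := by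
            push_cast [Nat.cast_sub (show 1 ≤ i by omega)]; ring
          rw [hc, h5]
          ring
    · have hne : ¬ n % 2 = 0 := by omega
      rw [if_neg hne]
      simp only [Bool.false_eq_true, false_iff]
      rintro ⟨i, hi1, hni⟩
      apply hev
      have h2 : (2 : Int) ^ i = 2 ^ (i - 1) * 2 := by rw [← pow_succ]; congr 1; omega
      exact ⟨(p + i) * 2 ^ (i - 1), by rw [hni, h2]; ring⟩

theorem pvW_ge (j : Nat) (hj : 1 ≤ j) : (j : Int) ≤ (j : Int) * 2 ^ j - 1 := by
  have h1 : (2 : Int) ≤ 2 ^ j := by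
    calc (2 : Int) = 2 ^ 1 := by ring
    _ ≤ 2 ^ j := pow_le_pow_right₀ (by norm_num) hj
  nlinarith [h1, Int.ofNat_le.mpr hj]

theorem pvW_mono {j k : Nat} (hj : 1 ≤ j) (hjk : j ≤ k) :
    (j : Int) * 2 ^ j - 1 ≤ (k : Int) * 2 ^ k - 1 := by
  have h1 : (2 : Int) ^ j ≤ 2 ^ k := pow_le_pow_right₀ (by norm_num) hjk
  have h2 : (0 : Int) ≤ j := by positivity
  have h3 : (j : Int) ≤ k := by exact_mod_cast hjk
  nlinarith [pow_pos (show (0:Int) < 2 by norm_num) j]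

-- B's loop returns true iff num is j·2^j - 1 for some j ≥ k.
theorem pvLoopB_iff (fuel : Nat) : ∀ (k : Nat) (num : Int), 1 ≤ k → num < ((k + fuel : Nat) : Int) →
    (pvLoopB num k fuel = true ↔ ∃ j : Nat, k ≤ j ∧ num = (j : Int) * 2 ^ j - 1) := by
  induction fuel with
  | zero =>
    intro k num hk hlt
    rw [pvLoopB]
    simp only [Bool.false_eq_true, false_iff]
    rintro ⟨j, hkj, hj⟩
    have := pvW_ge j (by omega)
    have : (k : Int) ≤ (j : Int) := by exact_mod_cast hkj
    simp only [Nat.add_zero] at hlt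
    omega
  | succ f ih =>
    intro k num hk hlt
    rw [pvLoopB]
    by_cases heq : (k : Int) * 2 ^ k - 1 = num
    · rw [if_pos heq]
      exact iff_of_true rfl ⟨k, le_refl k, heq.symm⟩
    · rw [if_neg heq]
      by_cases hgt : (k : Int) * 2 ^ k - 1 > num
      · rw [if_pos hgt]
        simp only [Bool.false_eq_true, false_iff]
        rintro ⟨j, hkj, hj⟩
        have := pvW_mono hk hkj
        omega
      · rw [if_neg hgt]
        rw [ih (k + 1) num (by omega) (by push_cast at hlt ⊢; omega)]
        constructor
        · rintro ⟨j, hkj, hj⟩; exact ⟨j, by omega, hj⟩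
        · rintro ⟨j, hkj, hj⟩
          refine ⟨j, ?_, hj⟩
          rcases Nat.lt_or_ge j (k + 1) with h | h
          · exfalso; have : j = k := by omega
            subst this; exact heq hj.symm
          · exact h

theorem pvAlt_iff (num : Int) :
    (is_woodall_alt num = true ↔ ∃ j : Nat, 1 ≤ j ∧ num = (j : Int) * 2 ^ j - 1) := by
  unfold is_woodall_alt
  exact pvLoopB_iff (num.natAbs + 1) 1 num (le_refl 1) (by omega)

-- ===== VERDICT (by name: the statement is the Claim_ definition above) =====
theorem is_woodall_spec : Claim_equal_is_woodall := by
  intro num _ hpre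
  unfold Spec_is_woodall
  rw [Bool.eq_iff_iff]
  unfold is_woodall
  rw [PySem.Int.mod_eq_emod_of_pos (by norm_num)]
  by_cases hev : num % 2 = 0
  · rw [if_pos hev]
    simp only [Bool.false_eq_true, false_iff]
    rw [pvAlt_iff]
    rintro ⟨j, hj1, hj⟩
    have h2 : (2 : Int) ^ j = 2 ^ (j - 1) * 2 := by rw [← pow_succ]; congr 1; omega
    rw [h2] at hj
    have h3 : num + 1 = 2 * ((j : Int) * 2 ^ (j - 1)) := by rw [hj]; ring
    omega
  · rw [if_neg hev]
    rw [pvLoopA_iff ((num + 1).natAbs) (num + 1) 0 (by unfold Pre_is_woodall at hpre; omega) (le_refl _)]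
    rw [pvAlt_iff]
    constructor
    · rintro ⟨i, hi1, hi⟩
      refine ⟨i, hi1, ?_⟩
      have he : (0 + (i : Int)) * 2 ^ i = (i : Int) * 2 ^ i := by ring
      omega
    · rintro ⟨j, hj1, hj⟩
      refine ⟨j, hj1, ?_⟩
      have he : (0 + (j : Int)) * 2 ^ j = (j : Int) * 2 ^ j := by ring
      omega
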